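-- pv_equiv track=rewrite | github.com/lexidarling/popgear | invoice.py | make_client
-- ===== SOURCE A (Python) =====
-- COLS = 80
--
-- def make_client(raw_invoice):
--     rh = [justify_left('Ship To:', COLS/2)]
--     for line in raw_invoice['shipping_info']:
--         rh.append(justify_left(line, COLS/2))
--     billing = raw_invoice['billing_info']
--     lh = [justify_left('Bill To:', COLS/2)]
--     for line in billing:
--         lh.append(justify_left(line, COLS/2))
--     ld = len(rh) - len(lh)
--     if ld > 0:
--         for i in range(ld):
--             lh.append(justify_left('', COLS/2))
--     elif ld < 0:
--         for i in range(abs(ld)):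
--             rh.append(justify_right('', COLS/2))
--
--     clientinfo = zip(lh, rh)
--     clientinfo = [''.join(x) for x in clientinfo]
--     clientinfo.append(justify_left('', COLS))
--     return clientinfo
--
-- def justify_right(text, width):
--     text = str(text)
--     if len(text) > width:
--         raise NotTruncatingForYouError
--     pad = width - len(text)
--     s = ' ' * int(pad)
--     s += text
--     return s
--
-- def justify_left(text, width):
--     text = str(text)
--     if len(text) > width:
--         raise NotTruncatingForYouError
--     pad = width - len(text)
--     s = text
--     s += ' ' * int(pad)
--     return s
--
-- class NotTruncatingForYouError(NotImplementedError):
--     pass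
-- ===== SOURCE B (Python) =====
-- COLS = 80
--
-- def make_client(raw_invoice):
--     # Recursive simultaneous consumption of both columns: each step emits one
--     # full row by padding the left cell to 40 and then the whole row to 80;
--     # the trailing blank line is the recursion's base case.  No lengths,
--     # no length difference, no padding loops, no zip.
--     def rows(bill, ship):
--         if not bill and not ship:
--             return [' ' * COLS]
--         l = bill[0] if bill else ''
--         r = ship[0] if ship else ''
--         row = (l.ljust(COLS // 2) + r).ljust(COLS)
--         return [row] + rows(bill[1:], ship[1:])
--     return rows(['Bill To:'] + list(raw_invoice['billing_info']),
--                 ['Ship To:'] + list(raw_invoice['shipping_info']))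
-- ===== Notes on version B (the rewrite author's own statement) =====
-- stated objective: alternative
-- what changed: B drops A's two pre-padded column lists, the length-difference computation, both padding loops and the zip, and instead recursively consumes the two raw columns in lockstep, building each output row directly by padding the left cell to 40 and then the whole row to 80, with the trailing blank line as the recursion's base case.
import Mathlib
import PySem

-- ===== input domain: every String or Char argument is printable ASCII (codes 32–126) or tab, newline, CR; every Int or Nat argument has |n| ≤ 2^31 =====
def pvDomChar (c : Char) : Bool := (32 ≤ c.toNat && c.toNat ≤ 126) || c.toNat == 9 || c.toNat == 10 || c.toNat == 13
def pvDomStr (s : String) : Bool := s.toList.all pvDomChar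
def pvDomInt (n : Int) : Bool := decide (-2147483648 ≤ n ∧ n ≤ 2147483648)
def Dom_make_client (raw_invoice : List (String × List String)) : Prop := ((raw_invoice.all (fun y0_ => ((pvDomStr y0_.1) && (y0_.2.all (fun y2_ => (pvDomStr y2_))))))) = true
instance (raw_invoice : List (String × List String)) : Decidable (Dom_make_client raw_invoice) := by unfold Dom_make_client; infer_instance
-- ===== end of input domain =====

-- B replaces A's pre-padded column lists, length-difference computation, padding loops and zip
-- by a lockstep recursion over the two raw columns that builds each row directly (objective: alternative).
-- Inputs on which Python A raises (a missing dict key, a cell longer than 40 chars) are excluded by Pre_.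

-- ===== PORT A =====
-- justify_left(text, COLS/2): pad with spaces to width (raise branch excluded by Pre_;
-- Nat subtraction makes the port total there, nothing is claimed outside Pre_)
def pvJustifyLeft (text : String) (width : Nat) : String :=
  String.ofList (text.toList ++ List.replicate (width - text.toList.length) ' ')

def pvJustifyRight (text : String) (width : Nat) : String :=
  String.ofList (List.replicate (width - text.toList.length) ' ' ++ text.toList)

def make_client (raw_invoice : List (String × List String)) : List String :=
  let d := PySem.Dict.ofList raw_invoice
  let rh := (d.getD "shipping_info" []).foldl
      (fun acc line => acc ++ [pvJustifyLeft line 40]) [pvJustifyLeft "Ship To:" 40]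
  let billing := d.getD "billing_info" []
  let lh := billing.foldl
      (fun acc line => acc ++ [pvJustifyLeft line 40]) [pvJustifyLeft "Bill To:" 40]
  let ld : Int := (rh.length : Int) - (lh.length : Int)
  let lh := if ld > 0 then
      (PySem.List.pyRange 0 ld 1).foldl (fun acc _ => acc ++ [pvJustifyLeft "" 40]) lh
    else lh
  let rh := if ld < 0 then
      (PySem.List.pyRange 0 |ld| 1).foldl (fun acc _ => acc ++ [pvJustifyRight "" 40]) rh
    else rh
  ((lh.zip rh).map (fun x => String.ofList (x.1.toList ++ x.2.toList)))
    ++ [pvJustifyLeft "" 80]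

-- ===== PORT B =====
-- s.ljust(w) on a list of chars (exact for ASCII strings)
def pvRPad (cs : List Char) (w : Nat) : List Char :=
  cs ++ List.replicate (w - cs.length) ' '

-- Source B's inner rows(bill, ship): lockstep recursion, '' for an exhausted side,
-- row = (l.ljust(40) + r).ljust(80), blank 80-space line at the base case
def pvRows : List String → List String → List String
  | [], [] => [String.ofList (List.replicate 80 ' ')]
  | b :: bs, [] => String.ofList (pvRPad (pvRPad b.toList 40 ++ "".toList) 80) :: pvRows bs []
  | [], s :: ss => String.ofList (pvRPad (pvRPad "".toList 40 ++ s.toList) 80) :: pvRows [] ss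
  | b :: bs, s :: ss => String.ofList (pvRPad (pvRPad b.toList 40 ++ s.toList) 80) :: pvRows bs ss

def make_client_alt (raw_invoice : List (String × List String)) : List String :=
  let d := PySem.Dict.ofList raw_invoice
  pvRows ("Bill To:" :: d.getD "billing_info" []) ("Ship To:" :: d.getD "shipping_info" [])

-- ===== PRECONDITION & SPEC =====
-- Pre_ = exactly the inputs on which Python A returns: both keys present
-- (else KeyError) and every cell at most 40 chars (else NotTruncatingForYouError).
def Pre_make_client (raw_invoice : List (String × List String)) : Prop :=
  let d := PySem.Dict.ofList raw_invoice
  d.contains "billing_info" = true ∧ d.contains "shipping_info" = true ∧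
  (d.getD "billing_info" []).all (fun s => s.toList.length ≤ 40) = true ∧
  (d.getD "shipping_info" []).all (fun s => s.toList.length ≤ 40) = true
instance (raw_invoice : List (String × List String)) : Decidable (Pre_make_client raw_invoice) := by
  unfold Pre_make_client; infer_instance

def pvWitness_make_client : (List (String × List String)) :=
  [("billing_info", ["Acme Corp", "1 Main St"]), ("shipping_info", ["Depot"])]

def Spec_make_client (raw_invoice : List (String × List String)) (out : List String) : Prop := out = make_client_alt raw_invoice
instance (raw_invoice : List (String × List String)) (out : List String) : Decidable (Spec_make_client raw_invoice out) := by unfold Spec_make_client; infer_instance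

-- ===== CLAIM (what is proved, stated in full; the proofs are below) =====
def Claim_equal_make_client : Prop := ∀ (raw_invoice : List (String × List String)), Dom_make_client raw_invoice → Pre_make_client raw_invoice → Spec_make_client raw_invoice (make_client raw_invoice)

-- ===== LEMMAS AND PROOFS =====

-- A's padding loop 'for i in range(k): acc.append(c)' appends k copies.
theorem pv_foldl_const_append {α β : Type} (L : List α) (c : β) (l : List β) :
    L.foldl (fun acc _ => acc ++ [c]) l = l ++ List.replicate L.length c := by
  induction L generalizing l with
  | nil => simp
  | cons x xs ih =>
    simp only [List.foldl_cons, ih, List.length_cons, List.append_assoc]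
    rw [List.singleton_append, ← List.replicate_succ, List.replicate_succ']

theorem pv_jl_empty : pvJustifyLeft "" 40 = String.ofList (List.replicate 40 ' ') := by decide

theorem pv_jr_empty : pvJustifyRight "" 40 = String.ofList (List.replicate 40 ' ') := by decide

-- a B row with left cell at most 40 chars is exactly the pair of 40-wide left-justified cells
theorem pv_row_eq (l r : String) (hl : l.toList.length ≤ 40) :
    String.ofList (pvRPad (pvRPad l.toList 40 ++ r.toList) 80)
      = String.ofList ((pvJustifyLeft l 40).toList ++ (pvJustifyLeft r 40).toList) := by
  have h : 80 - (l.toList ++ List.replicate (40 - l.toList.length) ' ' ++ r.toList).length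
      = 40 - r.toList.length := by
    simp only [List.length_append, List.length_replicate]; omega
  simp only [pvRPad, pvJustifyLeft, String.toList_ofList, List.append_assoc] at *
  rw [h]


-- the zipped, pre-padded columns of A, as a function of the raw columns
def pvPadZip (L R : List String) : List String :=
  ((L.map (pvJustifyLeft · 40) ++ List.replicate (R.length - L.length) (pvJustifyLeft "" 40)).zip
    (R.map (pvJustifyLeft · 40) ++ List.replicate (L.length - R.length) (pvJustifyLeft "" 40))).map
      (fun x => String.ofList (x.1.toList ++ x.2.toList))

theorem pv_padZip_nil_cons (s : String) (ss : List String) :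
    pvPadZip [] (s :: ss)
      = String.ofList ((pvJustifyLeft "" 40).toList ++ (pvJustifyLeft s 40).toList) :: pvPadZip [] ss := by
  simp [pvPadZip, List.replicate_succ]

theorem pv_padZip_cons_nil (b : String) (bs : List String) :
    pvPadZip (b :: bs) []
      = String.ofList ((pvJustifyLeft b 40).toList ++ (pvJustifyLeft "" 40).toList) :: pvPadZip bs [] := by
  simp [pvPadZip, List.replicate_succ]

theorem pv_padZip_cons_cons (b s : String) (bs ss : List String) :
    pvPadZip (b :: bs) (s :: ss)
      = String.ofList ((pvJustifyLeft b 40).toList ++ (pvJustifyLeft s 40).toList) :: pvPadZip bs ss := by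
  simp [pvPadZip, Nat.succ_sub_succ]

theorem pv_rows_nil (R : List String) :
    pvRows [] R = pvPadZip [] R ++ [String.ofList (List.replicate 80 ' ')] := by
  induction R with
  | nil => simp [pvRows, pvPadZip]
  | cons s ss ih =>
    simp only [pvRows]
    rw [ih, pv_padZip_nil_cons, List.cons_append]
    exact congrArg₂ _ (pv_row_eq "" s (by decide)) rfl

theorem pv_rows_eq (L R : List String) (hL : ∀ s ∈ L, s.toList.length ≤ 40) :
    pvRows L R = pvPadZip L R ++ [String.ofList (List.replicate 80 ' ')] := by
  induction L generalizing R with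
  | nil => exact pv_rows_nil R
  | cons b bs ih =>
    have hb : b.toList.length ≤ 40 := hL b (by simp)
    have hbs : ∀ s ∈ bs, s.toList.length ≤ 40 := fun s hs => hL s (by simp [hs])
    cases R with
    | nil =>
      simp only [pvRows]
      rw [ih [] hbs, pv_padZip_cons_nil, List.cons_append]
      exact congrArg₂ _ (pv_row_eq b "" hb) rfl
    | cons s ss =>
      simp only [pvRows]
      rw [ih ss hbs, pv_padZip_cons_cons, List.cons_append]
      exact congrArg₂ _ (pv_row_eq b s hb) rfl

theorem pv_main (raw_invoice : List (String × List String))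
    (hB : (((PySem.Dict.ofList raw_invoice).getD "billing_info" []).all
        (fun s => s.toList.length ≤ 40)) = true) :
    make_client raw_invoice = make_client_alt raw_invoice := by
  unfold make_client make_client_alt
  set d := PySem.Dict.ofList raw_invoice
  set B := d.getD "billing_info" []
  set S := d.getD "shipping_info" []
  simp only [pv_foldl_const_append]
  have hlh : B.foldl (fun acc line => acc ++ [pvJustifyLeft line 40]) [pvJustifyLeft "Bill To:" 40]
      = ("Bill To:" :: B).map (pvJustifyLeft · 40) := by
    simpa using PySem.List.foldl_append_singleton_eq_map (f := (pvJustifyLeft · 40))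
      (l := B) (acc := [pvJustifyLeft "Bill To:" 40])
  have hrh : S.foldl (fun acc line => acc ++ [pvJustifyLeft line 40]) [pvJustifyLeft "Ship To:" 40]
      = ("Ship To:" :: S).map (pvJustifyLeft · 40) := by
    simpa using PySem.List.foldl_append_singleton_eq_map (f := (pvJustifyLeft · 40))
      (l := S) (acc := [pvJustifyLeft "Ship To:" 40])
  rw [hlh, hrh]
  set Lb := "Bill To:" :: B with hLb
  set Ls := "Ship To:" :: S with hLs
  set m := Lb.length
  set n := Ls.length
  have hm : (Lb.map (pvJustifyLeft · 40)).length = m := by simp [m]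
  have hn : (Ls.map (pvJustifyLeft · 40)).length = n := by simp [n]
  rw [hm, hn]
  set ld : Int := (n : Int) - (m : Int) with hld
  have hone : ∀ k : Int, (PySem.List.pyRange 0 k 1).length = k.toNat := by
    intro k; simp [PySem.List.length_pyRange_one (a := 0) (b := k)]
  have hlhs :
      (if ld > 0 then Lb.map (pvJustifyLeft · 40) ++
          List.replicate (PySem.List.pyRange 0 ld 1).length (pvJustifyLeft "" 40)
        else Lb.map (pvJustifyLeft · 40))
      = Lb.map (pvJustifyLeft · 40) ++ List.replicate (n - m) (pvJustifyLeft "" 40) := by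
    by_cases h : ld > 0
    · rw [if_pos h, hone]
      congr 2
      omega
    · rw [if_neg h]
      have : n - m = 0 := by omega
      simp [this]
  have hrhs :
      (if ld < 0 then Ls.map (pvJustifyLeft · 40) ++
          List.replicate (PySem.List.pyRange 0 |ld| 1).length (pvJustifyRight "" 40)
        else Ls.map (pvJustifyLeft · 40))
      = Ls.map (pvJustifyLeft · 40) ++ List.replicate (m - n) (pvJustifyLeft "" 40) := by
    by_cases h : ld < 0
    · rw [if_pos h, hone, pv_jr_empty, ← pv_jl_empty, abs_of_neg h]
      congr 2
      omega
    · rw [if_neg h]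
      have : m - n = 0 := by omega
      simp [this]
  rw [hlhs, hrhs]
  have hcells : ∀ s ∈ Lb, s.toList.length ≤ 40 := by
    intro s hs
    rw [hLb, List.mem_cons] at hs
    rcases hs with h | h
    · subst h; decide
    · have hB' : ∀ t ∈ B, t.toList.length ≤ 40 := by simpa [List.all_eq_true] using hB
      exact hB' s h
  rw [pv_rows_eq Lb Ls hcells]
  rfl

-- ===== VERDICT (by name: the statement is the Claim_ definition above) =====
theorem make_client_spec : Claim_equal_make_client := by
  intro raw_invoice _ hpre
  unfold Spec_make_client
  exact pv_main raw_invoice hpre.2.2.1
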